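-- pv_equiv track=rewrite | github.com/KanuSaru/cigarette-battery-widget | main.py | choose_sprite
-- ===== SOURCE A (Python) =====
-- def choose_sprite(percent):
--     ranges = [
--         (90, "cig_full.png"),
--         (75, "cig_75.png"),
--         (50, "cig_50.png"),
--         (25, "cig_25.png"),
--         (0, "cig_0.png"),
--     ]
--     for threshold, name in ranges:
--         if percent >= threshold:
--             return name
-- ===== SOURCE B (Python) =====
-- import bisect
--
-- _BOUNDARIES = [0, 25, 50, 75, 90]
-- _NAMES = [None, "cig_0.png", "cig_25.png", "cig_50.png", "cig_75.png", "cig_full.png"]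
--
-- def choose_sprite(percent):
--     return _NAMES[bisect.bisect_right(_BOUNDARIES, percent)]
-- ===== Notes on version B (the rewrite author's own statement) =====
-- stated objective: idiomatic
-- what changed: Replaced the descending linear threshold scan with early return by a bisect_right binary search into an ascending boundary list indexing a parallel name table (with a None slot for percent < 0).
import Mathlib
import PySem

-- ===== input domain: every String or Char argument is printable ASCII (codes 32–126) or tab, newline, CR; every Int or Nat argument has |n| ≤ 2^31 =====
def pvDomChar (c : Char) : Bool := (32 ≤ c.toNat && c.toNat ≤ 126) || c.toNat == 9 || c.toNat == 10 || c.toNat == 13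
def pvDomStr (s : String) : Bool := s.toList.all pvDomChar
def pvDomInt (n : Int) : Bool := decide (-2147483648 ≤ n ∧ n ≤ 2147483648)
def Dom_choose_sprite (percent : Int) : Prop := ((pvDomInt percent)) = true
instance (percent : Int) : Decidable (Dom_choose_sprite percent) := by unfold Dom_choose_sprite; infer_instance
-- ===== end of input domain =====

-- B replaces A's descending linear threshold scan by a bisect_right index into an
-- ascending boundary list with a parallel name table (objective: idiomatic).

-- ===== PORT A =====
-- A's loop over the literal (threshold, name) list, returning on the first match.
def chooseSpriteScan (percent : Int) : List (Int × String) → Option String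
  | [] => none
  | (threshold, name) :: rest =>
      if percent ≥ threshold then some name else chooseSpriteScan percent rest

def choose_sprite (percent : Int) : Option String :=
  chooseSpriteScan percent
    [(90, "cig_full.png"), (75, "cig_75.png"), (50, "cig_50.png"),
     (25, "cig_25.png"), (0, "cig_0.png")]

-- ===== PORT B =====
def spriteBoundaries : List Int := [0, 25, 50, 75, 90]
def spriteNames : List (Option String) :=
  [none, some "cig_0.png", some "cig_25.png", some "cig_50.png",
   some "cig_75.png", some "cig_full.png"]

-- bisect.bisect_right on a sorted list = number of elements ≤ percent
def choose_sprite_alt (percent : Int) : Option String :=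
  spriteNames.getD (spriteBoundaries.countP (fun b => b ≤ percent)) none

-- ===== PRECONDITION & SPEC =====
def Spec_choose_sprite (percent : Int) (out : Option String) : Prop := out = choose_sprite_alt percent
instance (percent : Int) (out : Option String) : Decidable (Spec_choose_sprite percent out) := by unfold Spec_choose_sprite; infer_instance

-- ===== CLAIM (what is proved, stated in full; the proofs are below) =====
def Claim_equal_choose_sprite : Prop := ∀ (percent : Int), Dom_choose_sprite percent → Spec_choose_sprite percent (choose_sprite percent)

-- ===== LEMMAS AND PROOFS =====

-- ===== VERDICT (by name: the statement is the Claim_ definition above) =====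
theorem choose_sprite_spec : Claim_equal_choose_sprite := by
  intro p _
  by_cases h0 : (0:Int) ≤ p <;> by_cases h25 : (25:Int) ≤ p <;>
    by_cases h50 : (50:Int) ≤ p <;> by_cases h75 : (75:Int) ≤ p <;>
    by_cases h90 : (90:Int) ≤ p <;>
    first
    | (exfalso; omega)
    | simp [Spec_choose_sprite, choose_sprite, choose_sprite_alt, chooseSpriteScan,
        spriteBoundaries, spriteNames, List.countP, List.countP.go,
        h0, h25, h50, h75, h90, ge_iff_le]
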